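-- pv_equiv track=rewrite | github.com/orchardbirds/all_chess_moves | captures.py | capture_horizontally
-- ===== SOURCE A (Python) =====
-- def capture_horizontally(square):
--     file, rank = square
--     file_index = ord(file) - ord("a")
--
--     captures = []
--
--     for i in range(1, 8):
--         if file_index + i < 8:
--             captures.append(chr(ord(file) + i) + rank)
--         if file_index - i >= 0:
--             captures.append(chr(ord(file) - i) + rank)
--
--     return captures
-- ===== SOURCE B (Python) =====
-- def _interleave(xs, ys):
--     if not xs:
--         return list(ys)
--     if not ys:
--         return list(xs)
--     return [xs[0], ys[0]] + _interleave(xs[1:], ys[1:])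
--
--
-- def capture_horizontally(square):
--     file, rank = square
--     file_index = ord(file) - ord("a")
--     right = [chr(ord(file) + i) + rank for i in range(1, 8) if file_index + i < 8]
--     left = [chr(ord(file) - i) + rank for i in range(1, 8) if file_index - i >= 0]
--     return _interleave(right, left)
-- ===== Notes on version B (the rewrite author's own statement) =====
-- stated objective: alternative
-- what changed: A appends right/left captures inside one distance loop with two conditionals; B builds the rightward and leftward capture lists as two separate comprehensions and interleaves them per distance with a recursive helper.
import Mathlib
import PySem

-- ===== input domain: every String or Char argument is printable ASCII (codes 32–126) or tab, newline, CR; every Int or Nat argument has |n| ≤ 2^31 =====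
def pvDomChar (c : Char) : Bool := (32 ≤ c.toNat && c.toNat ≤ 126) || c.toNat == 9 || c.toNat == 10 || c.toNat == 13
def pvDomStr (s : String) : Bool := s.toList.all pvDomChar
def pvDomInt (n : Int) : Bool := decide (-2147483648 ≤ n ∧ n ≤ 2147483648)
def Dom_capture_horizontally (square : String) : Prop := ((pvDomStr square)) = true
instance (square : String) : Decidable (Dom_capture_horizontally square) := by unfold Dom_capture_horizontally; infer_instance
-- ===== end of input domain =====

-- B builds the rightward and leftward capture lists separately and interleaves them (alternative decomposition, same cost).

-- ===== PORT A =====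
-- body of A after the unpacking 'file, rank = square'
def captureLoop (file rank : Char) : List String :=
  let fileIndex : Int := (file.toNat : Int) - 97
  (PySem.List.pyRange 1 8 1).foldl (fun captures i =>
    let captures :=
      if fileIndex + i < 8
      then captures ++ [String.mk [Char.ofNat (file.toNat + i.toNat), rank]]
      else captures
    if fileIndex - i ≥ 0
    then captures ++ [String.mk [Char.ofNat (file.toNat - i.toNat), rank]]
    else captures) []

def capture_horizontally (square : String) : List String :=
  match square.toList with
  | [file, rank] => captureLoop file rank
  | _ => []  -- unpacking raises unless the string has exactly two characters; excluded by Pre_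

-- ===== PORT B =====
def interleaveStr : List String → List String → List String
  | [], ys => ys
  | xs, [] => xs
  | x :: xs, y :: ys => x :: y :: interleaveStr xs ys

-- body of B after the unpacking
def captureSides (file rank : Char) : List String :=
  let fileIndex : Int := (file.toNat : Int) - 97
  let right := ((PySem.List.pyRange 1 8 1).filter (fun i => fileIndex + i < 8)).map
      (fun i => String.mk [Char.ofNat (file.toNat + i.toNat), rank])
  let left := ((PySem.List.pyRange 1 8 1).filter (fun i => fileIndex - i ≥ 0)).map
      (fun i => String.mk [Char.ofNat (file.toNat - i.toNat), rank])
  interleaveStr right left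

def capture_horizontally_alt (square : String) : List String :=
  let cs := square.toList
  if h : cs.length = 2 then captureSides cs[0] cs[1] else []

-- ===== PRECONDITION & SPEC =====
-- Unpacking the square into file and rank raises ValueError unless the string has exactly two characters.
def Pre_capture_horizontally (square : String) : Prop := square.toList.length = 2
instance (square : String) : Decidable (Pre_capture_horizontally square) := by unfold Pre_capture_horizontally; infer_instance
def pvWitness_capture_horizontally : String := "a1"

def Spec_capture_horizontally (square : String) (out : List String) : Prop := out = capture_horizontally_alt square
instance (square : String) (out : List String) : Decidable (Spec_capture_horizontally square out) := by unfold Spec_capture_horizontally; infer_instance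

-- ===== CLAIM (what is proved, stated in full; the proofs are below) =====
def Claim_equal_capture_horizontally : Prop := ∀ (square : String), Dom_capture_horizontally square → Pre_capture_horizontally square → Spec_capture_horizontally square (capture_horizontally square)

-- ===== LEMMAS AND PROOFS =====
lemma capture_key (file rank : Char) (h : file.toNat ≤ 126) :
    captureLoop file rank = captureSides file rank := by
  unfold captureLoop captureSides
  generalize file.toNat = n at *
  interval_cases n <;> rfl

lemma a_eq (square : String) (f r : Char) (hl : square.toList = [f, r]) :
    capture_horizontally square = captureLoop f r := by
  unfold capture_horizontally
  rw [hl]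

lemma b_eq (square : String) (f r : Char) (hl : square.toList = [f, r]) :
    capture_horizontally_alt square = captureSides f r := by
  have h2 : square.toList.length = 2 := by rw [hl]; rfl
  unfold capture_horizontally_alt
  show (if h : square.toList.length = 2
        then captureSides square.toList[0] square.toList[1] else []) = captureSides f r
  rw [dif_pos h2]
  congr 1 <;> simp [hl]

-- ===== VERDICT (by name: the statement is the Claim_ definition above) =====
theorem capture_horizontally_spec : Claim_equal_capture_horizontally := by
  intro square hdom hpre
  unfold Spec_capture_horizontally
  unfold Pre_capture_horizontally at hpre
  obtain ⟨f, r, hl⟩ := List.length_eq_two.mp hpre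
  unfold Dom_capture_horizontally pvDomStr at hdom
  rw [hl] at hdom
  have hd : pvDomChar f = true := by simpa using (List.all_eq_true.mp hdom _ (by simp))
  have hle : f.toNat ≤ 126 := by
    unfold pvDomChar at hd
    simp at hd
    omega
  rw [a_eq square f r hl, b_eq square f r hl]
  exact capture_key f r hle
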